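-- pv_equiv track=rewrite | github.com/zopu/aoc-2024 | py/day21.py | best_move_next_level
-- ===== SOURCE A (Python) =====
-- def best_move_next_level(pad_moves, movestr, frm="A"):
--     result = ["."] * (len(movestr) * 6)
--     result_len = 0
--     last = frm
--     for c in movestr:
--         if last == c:
--             result[result_len] = "A"
--             result_len += 1
--             continue
--         options = pad_moves[(last, c)]
--         best = options[0]
--         for o in options:
--             if cmp_options(o, best):
--                 best = o
--         for bc in best:
--             result[result_len] = bc
--             result_len += 1
--         result[result_len] = "A"
--         result_len += 1
--         last = c
--     return "".join(result[:result_len])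
--
-- def cmp_options(a, b):
--     if len(a) != len(b):
--         return len(b) > len(a)
--     for ca, cb in zip(a, b):
--         if ca == cb:
--             continue
--         match ca, cb:
--             case "<", _:
--                 return True
--             case _, "<":
--                 return False
--             case "v", _:
--                 return True
--             case _, "v":
--                 return False
--             case "^", _:
--                 return True
--             case _, "^":
--                 return False
--             case ">", _:
--                 return True
--             case _, ">":
--                 return False
--     return False
-- ===== SOURCE B (Python) =====
-- # B: precompute a best-option table once, then one flat pass collecting pieces joined at the end
-- # (instead of A's per-step scan over options writing into a preallocated char buffer).
--
-- _PRI = {"<": 0, "v": 1, "^": 2, ">": 3}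
--
-- def cmp_options(a, b):
--     if len(a) != len(b):
--         return len(a) < len(b)
--     for ca, cb in zip(a, b):
--         pa = _PRI.get(ca, 4)
--         pb = _PRI.get(cb, 4)
--         if ca != cb and (pa < 4 or pb < 4):
--             return pa < pb
--     return False
--
-- def _best(opts):
--     it = iter(opts)
--     b = next(it)
--     for o in it:
--         if cmp_options(o, b):
--             b = o
--     return b
--
-- def best_move_next_level(pad_moves, movestr, frm="A"):
--     best = {k: _best(opts) for k, opts in pad_moves.items() if opts}
--     pieces = []
--     last = frm
--     for c in movestr:
--         if last != c:
--             pieces.append(best[(last, c)])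
--         pieces.append("A")
--         last = c
--     return "".join(pieces)
-- ===== Notes on version B (the rewrite author's own statement) =====
-- stated objective: simpler
-- what changed: B precomputes a dict mapping each pad_moves key to its single best option (one reduction over each option list, with A's exact tie-break order), then does one flat pass over movestr collecting string pieces joined at the end, replacing A's per-step option scan and hand-managed preallocated '.'-filled character buffer; the comparator is re-expressed via a priority table instead of a match chain.
import Mathlib
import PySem

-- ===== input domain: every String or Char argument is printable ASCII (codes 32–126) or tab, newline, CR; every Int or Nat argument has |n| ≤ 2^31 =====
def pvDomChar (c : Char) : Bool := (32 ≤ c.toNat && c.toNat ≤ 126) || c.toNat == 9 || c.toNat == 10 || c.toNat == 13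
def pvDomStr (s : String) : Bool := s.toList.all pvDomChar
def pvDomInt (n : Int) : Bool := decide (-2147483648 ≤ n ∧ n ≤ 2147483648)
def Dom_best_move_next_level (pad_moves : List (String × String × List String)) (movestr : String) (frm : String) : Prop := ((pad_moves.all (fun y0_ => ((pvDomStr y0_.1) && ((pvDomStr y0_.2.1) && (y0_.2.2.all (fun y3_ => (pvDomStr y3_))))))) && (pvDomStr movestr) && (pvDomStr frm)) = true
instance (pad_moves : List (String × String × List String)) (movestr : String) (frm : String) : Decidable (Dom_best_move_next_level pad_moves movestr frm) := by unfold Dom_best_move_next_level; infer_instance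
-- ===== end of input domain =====

-- B precomputes a best-option table once and collects joined pieces in one flat pass,
-- instead of A's per-step option scan writing into a preallocated "." buffer; same results, no speed claim.

-- ===== PORT A =====
-- the inner match-based scan of cmp_options, step for step
def cmp_scan : List (Char × Char) → Bool
  | [] => false
  | (ca, cb) :: rest =>
    if ca == cb then cmp_scan rest
    else if ca == '<' then true
    else if cb == '<' then false
    else if ca == 'v' then true
    else if cb == 'v' then false
    else if ca == '^' then true
    else if cb == '^' then false
    else if ca == '>' then true
    else if cb == '>' then false
    else cmp_scan rest   -- no match case fires: loop continues

def cmp_options (a b : String) : Bool :=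
  if a.toList.length ≠ b.toList.length then decide (b.toList.length > a.toList.length)
  else cmp_scan (a.toList.zip b.toList)

-- pad_moves[(last, c)] : dict lookup = first matching key (Pre_ keeps keys distinct)
def padLookup (pad_moves : List (String × String × List String)) (l c : String) : Option (List String) :=
  (pad_moves.find? (fun e => e.1 == l && e.2.1 == c)).map (fun e => e.2.2)

-- loop body of A's `for c in movestr`, state = (result buffer, result_len, last)
def stepA (pad_moves : List (String × String × List String)) (st : List String × Nat × String) (c : Char) : List String × Nat × String :=
  let cs := String.singleton c
  if st.2.2 == cs then
    (PySem.List.pySetD st.1 (st.2.1 : Int) "A", st.2.1 + 1, st.2.2)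
  else
    let options := (padLookup pad_moves st.2.2 cs).getD []   -- KeyError (none) excluded by Pre_
    let best := options.foldl (fun b o => if cmp_options o b then o else b) (options.headD "")   -- options[0]; empty excluded by Pre_
    let p := best.toList.foldl
      (fun (p : List String × Nat) bc => (PySem.List.pySetD p.1 (p.2 : Int) (String.singleton bc), p.2 + 1))
      (st.1, st.2.1)
    (PySem.List.pySetD p.1 (p.2 : Int) "A", p.2 + 1, cs)

def best_move_next_level (pad_moves : List (String × String × List String)) (movestr : String) (frm : String) : String :=
  let st := movestr.toList.foldl (stepA pad_moves) (List.replicate (movestr.toList.length * 6) ".", 0, frm)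
  PySem.Str.join "" (st.1.take st.2.1)

-- ===== PORT B =====
def pvPri (c : Char) : Nat :=
  if c == '<' then 0 else if c == 'v' then 1 else if c == '^' then 2 else if c == '>' then 3 else 4

def pri_scan : List (Char × Char) → Bool
  | [] => false
  | (ca, cb) :: rest =>
    if ca != cb && (pvPri ca < 4 || pvPri cb < 4) then decide (pvPri ca < pvPri cb)
    else pri_scan rest

def cmp_options_b (a b : String) : Bool :=
  if a.toList.length ≠ b.toList.length then decide (a.toList.length < b.toList.length)
  else pri_scan (a.toList.zip b.toList)

def bestB (opts : List String) : String :=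
  match opts with
  | [] => ""          -- never called on []: the table comprehension filters empty option lists
  | h :: t => t.foldl (fun b o => if cmp_options_b o b then o else b) h

-- {k: _best(opts) for k, opts in pad_moves.items() if opts}
def tableB (pad_moves : List (String × String × List String)) : List ((String × String) × String) :=
  pad_moves.filterMap (fun e => if e.2.2.isEmpty then none else some ((e.1, e.2.1), bestB e.2.2))

-- loop body of B's flat pass, state = (pieces, last)
def stepB (t : List ((String × String) × String)) (st : List String × String) (c : Char) : List String × String :=
  let cs := String.singleton c
  let pieces := if st.2 == cs then st.1
    else st.1 ++ [((t.find? (fun e => e.1.1 == st.2 && e.1.2 == cs)).map (fun e => e.2)).getD ""]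
  (pieces ++ ["A"], cs)

def best_move_next_level_alt (pad_moves : List (String × String × List String)) (movestr : String) (frm : String) : String :=
  let t := tableB pad_moves
  let st := movestr.toList.foldl (stepB t) ([], frm)
  PySem.Str.join "" st.1

-- ===== PRECONDITION & SPEC =====
-- minimum option length (= length of the option A selects; A's cmp prefers strictly shorter options)
def minLen (opts : List String) : Nat :=
  match opts with
  | [] => 0
  | h :: t => t.foldl (fun m o => min m o.toList.length) h.toList.length

def stepCost (pad_moves : List (String × String × List String)) (l c : String) : Nat :=
  if l = c then 1 else minLen ((padLookup pad_moves l c).getD []) + 1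

-- total number of characters A writes, walking the transitions of movestr from `last`
def costFrom (pad_moves : List (String × String × List String)) (last : String) : List Char → Nat
  | [] => 0
  | c :: rest => stepCost pad_moves last (String.singleton c) + costFrom pad_moves (String.singleton c) rest

-- every needed (last, c) transition is present in pad_moves with a nonempty option list
def keysOk (pad_moves : List (String × String × List String)) (last : String) : List Char → Bool
  | [] => true
  | c :: rest =>
    (last == String.singleton c || !((padLookup pad_moves last (String.singleton c)).getD []).isEmpty)
      && keysOk pad_moves (String.singleton c) rest

-- Pre_ excludes exactly (a) the inputs where A raises — a needed transition missing from pad_moves (KeyError),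
-- an empty option list or a total output longer than the preallocated 6·len(movestr) buffer (IndexError) — and
-- (b) pad_moves lists with duplicate (from, to) keys, unrepresentable as the Python dict A and B receive.
def Pre_best_move_next_level (pad_moves : List (String × String × List String)) (movestr : String) (frm : String) : Prop :=
  pad_moves.Pairwise (fun a b => (a.1, a.2.1) ≠ (b.1, b.2.1))
    ∧ keysOk pad_moves frm movestr.toList = true
    ∧ costFrom pad_moves frm movestr.toList ≤ 6 * movestr.toList.length

instance (pad_moves : List (String × String × List String)) (movestr : String) (frm : String) : Decidable (Pre_best_move_next_level pad_moves movestr frm) := by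
  unfold Pre_best_move_next_level; infer_instance

def pvWitness_best_move_next_level : (List (String × String × List String)) × String × String :=
  ([("A", "B", ["<"])], "B", "A")

def Spec_best_move_next_level (pad_moves : List (String × String × List String)) (movestr : String) (frm : String) (out : String) : Prop := out = best_move_next_level_alt pad_moves movestr frm
instance (pad_moves : List (String × String × List String)) (movestr : String) (frm : String) (out : String) : Decidable (Spec_best_move_next_level pad_moves movestr frm out) := by unfold Spec_best_move_next_level; infer_instance

-- ===== CLAIM (what is proved, stated in full; the proofs are below) =====
def Claim_equal_best_move_next_level : Prop := ∀ (pad_moves : List (String × String × List String)) (movestr : String) (frm : String), Dom_best_move_next_level pad_moves movestr frm → Pre_best_move_next_level pad_moves movestr frm → Spec_best_move_next_level pad_moves movestr frm (best_move_next_level pad_moves movestr frm)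

-- ===== LEMMAS AND PROOFS =====

-- the two comparator scans agree
lemma scan_eq (ps : List (Char × Char)) : pri_scan ps = cmp_scan ps := by
  induction ps with
  | nil => rfl
  | cons p rest ih =>
    obtain ⟨ca, cb⟩ := p
    by_cases h : ca = cb
    · subst h; simp [cmp_scan, pri_scan, ih]
    · simp only [cmp_scan, pri_scan, pvPri]
      split_ifs <;> simp_all

lemma cmpb_eq : cmp_options_b = cmp_options := by
  funext a b
  unfold cmp_options_b cmp_options
  rw [scan_eq]

-- A's inner best-selection fold equals B's table entry
lemma bestA_eq_bestB (opts : List String) :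
    opts.foldl (fun b o => if cmp_options o b then o else b) (opts.headD "") = bestB opts := by
  cases opts with
  | nil => rfl
  | cons h t => simp only [bestB, List.headD_cons, List.foldl_cons, cmpb_eq, ite_self]

lemma len_pick (b o : String) :
    ((if cmp_options o b then o else b).toList.length) = min b.toList.length o.toList.length := by
  by_cases h : o.toList.length = b.toList.length
  · have hco : cmp_options o b = cmp_scan (o.toList.zip b.toList) := by
      unfold cmp_options; rw [if_neg (by omega)]
    rw [hco]; split <;> omega
  · have hco : cmp_options o b = decide (b.toList.length > o.toList.length) := by
      unfold cmp_options; rw [if_pos h]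
    rw [hco]
    split
    · next hd => rw [decide_eq_true_eq] at hd; omega
    · next hd => rw [decide_eq_true_eq] at hd; omega

lemma len_fold_pick (t : List String) (b : String) :
    ((t.foldl (fun b o => if cmp_options o b then o else b) b).toList.length)
      = t.foldl (fun m o => min m o.toList.length) b.toList.length := by
  induction t generalizing b with
  | nil => rfl
  | cons h tl ih => simp only [List.foldl_cons, ih, len_pick]

lemma len_bestB (opts : List String) :
    opts ≠ [] → (bestB opts).toList.length = minLen opts := by
  cases opts with
  | nil => simp
  | cons h t =>
    intro _
    simp only [bestB, minLen, cmpb_eq]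
    exact len_fold_pick t h

-- a dict lookup in B's precomputed table gives bestB of A's looked-up option list
lemma table_find (pm : List (String × String × List String)) (l c : String) (opts : List String)
    (h : padLookup pm l c = some opts) (hne : opts ≠ []) :
    ((tableB pm).find? (fun e => e.1.1 == l && e.1.2 == c)) = some ((l, c), bestB opts) := by
  induction pm with
  | nil => simp [padLookup] at h
  | cons e rest ih =>
    by_cases hm : (e.1 == l && e.2.1 == c) = true
    · have h1 : padLookup (e :: rest) l c = some e.2.2 := by
        unfold padLookup
        simp only [List.find?_cons, hm]
        rfl
      rw [h1] at h
      obtain rfl : e.2.2 = opts := by simpa using h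
      obtain ⟨hl, hc⟩ : e.1 = l ∧ e.2.1 = c := by simpa using hm
      have hie : e.2.2.isEmpty = false := by simpa using hne
      have hkeep : (if e.2.2.isEmpty then none else some ((e.1, e.2.1), bestB e.2.2))
          = some ((e.1, e.2.1), bestB e.2.2) := by rw [hie]; rfl
      simp only [tableB, List.filterMap_cons, hkeep]
      have hp : ((fun e => e.1.1 == l && e.1.2 == c) (((e.1, e.2.1), bestB e.2.2) : (String × String) × String)) = true := by
        simp [hl, hc]
      simp only [List.find?_cons, hp]
      rw [hl, hc]
    · have hmf : (e.1 == l && e.2.1 == c) = false := by simpa using hm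
      have h1 : padLookup (e :: rest) l c = padLookup rest l c := by
        unfold padLookup
        simp only [List.find?_cons, hmf]
      rw [h1] at h
      simp only [tableB, List.filterMap_cons]
      split_ifs with he
      · exact ih h
      · have hp : ((fun e => e.1.1 == l && e.1.2 == c) (((e.1, e.2.1), bestB e.2.2) : (String × String) × String)) = false := by
          simpa using hm
        simp only [List.find?_cons, hp]
        exact ih h

-- the pieces of B, flattened into the single-character cells A's buffer holds
def flatP (ps : List String) : List String := ps.flatMap (fun s => s.toList.map String.singleton)

lemma flatP_append (a b : List String) : flatP (a ++ b) = flatP a ++ flatP b := by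
  simp [flatP]

lemma flatP_A : flatP ["A"] = ["A"] := by decide

lemma flatP_single (s : String) : flatP [s] = s.toList.map String.singleton := by
  simp [flatP]

-- one in-range buffer write appends to the filled prefix
lemma setA (filled : List String) (m : Nat) (hm : 1 ≤ m) (v : String) :
    PySem.List.pySetD (filled ++ List.replicate m ".") (filled.length : Int) v
      = (filled ++ [v]) ++ List.replicate (m - 1) "." := by
  rw [PySem.List.pySetD_natCast]
  obtain ⟨m', rfl⟩ : ∃ m', m = m' + 1 := ⟨m - 1, by omega⟩
  rw [List.set_append_right _ _ (le_refl _), Nat.sub_self, List.replicate_succ]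
  simp

-- A's inner character-writing loop fills the buffer left to right
lemma writeChars : ∀ (l : List Char) (filled : List String) (m : Nat), l.length ≤ m →
    l.foldl (fun (p : List String × Nat) bc => (PySem.List.pySetD p.1 (p.2 : Int) (String.singleton bc), p.2 + 1))
      (filled ++ List.replicate m ".", filled.length)
    = ((filled ++ l.map String.singleton) ++ List.replicate (m - l.length) ".", filled.length + l.length) := by
  intro l
  induction l with
  | nil => intro filled m _; simp
  | cons c cs ih =>
    intro filled m hm
    rw [List.foldl_cons]
    have h1 := setA filled m (by simp at hm; omega) (String.singleton c)
    simp only [h1]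
    have hlen : filled.length + 1 = (filled ++ [String.singleton c]).length := by simp
    rw [hlen, ih (filled ++ [String.singleton c]) (m - 1) (by simp only [List.length_cons] at hm; omega)]
    refine Prod.ext ?_ ?_
    · rw [show m - 1 - cs.length = m - (c :: cs).length from by
        simp only [List.length_cons]; omega]
      simp [List.append_assoc]
    · simp only [List.length_append, List.length_cons, List.length_nil]
      omega

-- the main loops: A's buffer-filling pass tracks B's pieces pass
lemma loop_eq (pm : List (String × String × List String)) (N : Nat) :
    ∀ (cs : List Char) (pieces : List String) (last : String),
    keysOk pm last cs = true →
    (flatP pieces).length + costFrom pm last cs ≤ N →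
    cs.foldl (stepA pm) (flatP pieces ++ List.replicate (N - (flatP pieces).length) ".", (flatP pieces).length, last)
      = ((fun r => (flatP r.1 ++ List.replicate (N - (flatP r.1).length) ".", (flatP r.1).length, r.2))
          (cs.foldl (stepB (tableB pm)) (pieces, last))) := by
  intro cs
  induction cs with
  | nil => intro pieces last _ _; rfl
  | cons c rest ih =>
    intro pieces last hk hc
    rw [List.foldl_cons, List.foldl_cons]
    simp only [keysOk, Bool.and_eq_true] at hk
    obtain ⟨hk1, hk2⟩ := hk
    simp only [costFrom] at hc
    by_cases heq : last = String.singleton c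
    · -- repeated key: A writes just "A", B appends just "A"
      have hcost1 : stepCost pm last (String.singleton c) = 1 := by
        unfold stepCost; rw [if_pos heq]
      rw [hcost1] at hc
      have hA : stepA pm (flatP pieces ++ List.replicate (N - (flatP pieces).length) ".", (flatP pieces).length, last) c
          = (flatP (pieces ++ ["A"]) ++ List.replicate (N - (flatP (pieces ++ ["A"])).length) ".", (flatP (pieces ++ ["A"])).length, String.singleton c) := by
        simp only [stepA]
        rw [if_pos (by simpa using heq)]
        rw [setA _ _ (by omega)]
        rw [flatP_append, flatP_A]
        have hN : N - (flatP pieces).length - 1 = N - (flatP pieces ++ ["A"]).length := by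
          simp; omega
        have hK : (flatP pieces).length + 1 = (flatP pieces ++ ["A"]).length := by simp
        rw [hN, hK, heq]
      have hB : stepB (tableB pm) (pieces, last) c = (pieces ++ ["A"], String.singleton c) := by
        simp only [stepB]
        rw [if_pos (by simpa using heq)]
      rw [hA, hB]
      exact ih (pieces ++ ["A"]) (String.singleton c) hk2
        (by rw [flatP_append, flatP_A]; simp at hc ⊢; omega)
    · -- transition: A scans options and writes best ++ "A", B appends its table entry and "A"
      have hne : (last == String.singleton c) = false := by simpa using heq
      rw [hne] at hk1
      simp only [Bool.false_or, Bool.not_eq_eq_eq_not, Bool.not_true] at hk1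
      -- the looked-up option list
      obtain ⟨opts, hpl, hone⟩ : ∃ opts, padLookup pm last (String.singleton c) = some opts ∧ opts ≠ [] := by
        cases hp : padLookup pm last (String.singleton c) with
        | none => rw [hp] at hk1; simp at hk1
        | some o =>
          refine ⟨o, rfl, ?_⟩
          rw [hp] at hk1
          simpa using hk1
      have hgd : (padLookup pm last (String.singleton c)).getD [] = opts := by rw [hpl]; rfl
      have hcost : stepCost pm last (String.singleton c) = minLen opts + 1 := by
        unfold stepCost; rw [if_neg heq, hgd]
      rw [hcost] at hc
      have hlb := len_bestB opts hone
      have hA : stepA pm (flatP pieces ++ List.replicate (N - (flatP pieces).length) ".", (flatP pieces).length, last) c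
          = (flatP (pieces ++ [bestB opts] ++ ["A"]) ++ List.replicate (N - (flatP (pieces ++ [bestB opts] ++ ["A"])).length) ".", (flatP (pieces ++ [bestB opts] ++ ["A"])).length, String.singleton c) := by
        simp only [stepA]
        rw [if_neg (by simp [hne])]
        simp only [hgd, bestA_eq_bestB]
        rw [writeChars (bestB opts).toList (flatP pieces) (N - (flatP pieces).length) (by omega)]
        dsimp only
        rw [show (flatP pieces).length + (bestB opts).toList.length = ((flatP pieces) ++ (bestB opts).toList.map String.singleton).length from by simp]
        rw [setA _ _ (by simp [hlb]; omega)]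
        rw [flatP_append, flatP_append, flatP_A, flatP_single]
        refine Prod.ext ?_ (Prod.ext ?_ ?_)
        · rw [show N - (flatP pieces).length - (bestB opts).toList.length - 1
              = N - (flatP pieces ++ (List.map String.singleton (bestB opts).toList ++ ["A"])).length from by
            simp only [List.length_append, List.length_map, List.length_cons, List.length_nil]
            omega]
          simp [List.append_assoc]
        · simp only [List.length_append, List.length_map, List.length_cons, List.length_nil]
        · rfl
      have hB : stepB (tableB pm) (pieces, last) c = (pieces ++ [bestB opts] ++ ["A"], String.singleton c) := by
        simp only [stepB]
        rw [if_neg (by simp [hne])]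
        rw [table_find pm last (String.singleton c) opts hpl hone]
        rfl
      rw [hA, hB]
      refine ih (pieces ++ [bestB opts] ++ ["A"]) (String.singleton c) hk2 ?_
      rw [flatP_append, flatP_append, flatP_A, flatP_single]
      simp [hlb] at hc ⊢
      omega

lemma joinNil : ∀ l : List (List Char), PySem.Chars.join [] l = l.flatten := by
  intro l
  induction l with
  | nil => simp [PySem.Chars.join_nil]
  | cons p rest ih =>
    cases rest with
    | nil => simp [PySem.Chars.join_singleton]
    | cons q rest' =>
      rw [PySem.Chars.join_cons_cons, ih]
      simp

-- joining the flattened single-character pieces gives the join of the pieces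
lemma join_flat (ps : List String) : PySem.Str.join "" (flatP ps) = PySem.Str.join "" ps := by
  apply String.toList_injective
  rw [PySem.Str.toList_join, PySem.Str.toList_join]
  have he : ("" : String).toList = [] := rfl
  rw [he, joinNil, joinNil]
  induction ps with
  | nil => rfl
  | cons s rest ih =>
    rw [show flatP (s :: rest) = flatP [s] ++ flatP rest from by simp [flatP]]
    rw [flatP_single]
    simp only [List.map_append, List.map_map, List.flatten_append, List.map_cons, List.flatten_cons]
    rw [ih]
    congr 1
    have : (String.toList ∘ String.singleton) = (fun c => [c]) := by
      funext c; simp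
    rw [this, ← List.flatMap_def, List.flatMap_singleton']

-- ===== VERDICT (by name: the statement is the Claim_ definition above) =====
theorem best_move_next_level_spec : Claim_equal_best_move_next_level := by
  unfold Claim_equal_best_move_next_level Spec_best_move_next_level
  intro pm ms frm _ hpre
  obtain ⟨-, hk, hc⟩ := hpre
  simp only [best_move_next_level, best_move_next_level_alt]
  have h0 : flatP ([] : List String) = [] := rfl
  have hl := loop_eq pm (ms.toList.length * 6) ms.toList [] frm hk
    (by rw [h0]; simp only [List.length_nil, Nat.zero_add]; omega)
  rw [h0] at hl
  simp only [List.length_nil, Nat.sub_zero, List.nil_append] at hl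
  rw [hl]
  rw [List.take_left' rfl]
  exact join_flat _
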